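-- pv_equiv track=rewrite | github.com/jhj9109/ProcessAutomator1 | extract_apartment_info.py | get_new_data
-- ===== SOURCE A (Python) =====
-- def get_new_data(apartment_data):
--     result = dict()
--     for k, v in apartment_data.items():
--         lst = []
--         i = 0
--         while i < len(v):
--             j = 1
--             while i + j < len(v) and v[i]+j == v[i+j]:
--                 j += 1
--             lst.append([v[i], v[i] + j - 1])
--             i += j
--         result[k] = lst
--     return result
-- ===== SOURCE B (Python) =====
-- def get_new_data(apartment_data):
--     result = {}
--     for k, v in apartment_data.items():
--         ranges = []
--         start = prev = None
--         for x in v: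
--             if start is None:
--                 start = prev = x
--             elif x == prev + 1:
--                 prev = x
--             else:
--                 ranges.append([start, prev])
--                 start = prev = x
--         if start is not None:
--             ranges.append([start, prev])
--         result[k] = ranges
--     return result
-- ===== Notes on version B (the rewrite author's own statement) =====
-- stated objective: simpler
-- what changed: Replaced A's nested index-based while loops (an inner scan recomputing each run's length via v[i]+j==v[i+j]) by a single forward pass over each value list that carries a run start and the previous element, flushing a range whenever the successor relation breaks.
import Mathlib
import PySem

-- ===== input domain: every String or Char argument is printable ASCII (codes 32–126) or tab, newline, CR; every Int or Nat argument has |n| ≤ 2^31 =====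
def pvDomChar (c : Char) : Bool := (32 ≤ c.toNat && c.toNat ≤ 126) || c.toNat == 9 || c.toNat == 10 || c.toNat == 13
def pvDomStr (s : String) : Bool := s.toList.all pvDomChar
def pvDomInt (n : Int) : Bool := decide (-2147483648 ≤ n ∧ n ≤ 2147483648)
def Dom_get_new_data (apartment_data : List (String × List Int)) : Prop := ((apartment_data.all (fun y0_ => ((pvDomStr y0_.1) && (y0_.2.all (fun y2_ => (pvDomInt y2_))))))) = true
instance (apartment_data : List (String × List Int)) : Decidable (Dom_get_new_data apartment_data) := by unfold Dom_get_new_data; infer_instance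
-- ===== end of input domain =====

-- B replaces A's nested index-based while loops by one forward pass per list carrying
-- the current run's start and previous element; objective: simpler. A is total.

-- ===== PORT A =====
-- inner 'while i + j < len(v) and v[i]+j == v[i+j]: j += 1'
def pvRunJ (v : List Int) (i j : Nat) : Nat :=
  if i + j < v.length ∧ v.getD i 0 + (j : Int) = v.getD (i + j) 0 then
    pvRunJ v i (j + 1)
  else j
termination_by v.length - (i + j)
decreasing_by omega

theorem pvRunJ_ge (v : List Int) (i j : Nat) : j ≤ pvRunJ v i j := by
  unfold pvRunJ
  split
  · exact le_trans (Nat.le_succ j) (pvRunJ_ge v i (j + 1))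
  · exact le_refl j
termination_by v.length - (i + j)
decreasing_by omega

-- outer 'while i < len(v): … lst.append([v[i], v[i]+j-1]); i += j'
def pvOuterA (v : List Int) (i : Nat) : List (List Int) :=
  if _h : i < v.length then
    let j := pvRunJ v i 1
    [v.getD i 0, v.getD i 0 + (j : Int) - 1] :: pvOuterA v (i + j)
  else []
termination_by v.length - i
decreasing_by have := pvRunJ_ge v i 1; omega

def get_new_data (apartment_data : List (String × List Int)) : List (String × List (List Int)) :=
  (apartment_data.foldl
    (fun (result : PySem.Dict String (List (List Int))) kv =>
      result.insert kv.1 (pvOuterA kv.2 0))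
    PySem.Dict.empty).items

-- ===== PORT B =====
-- 'for x in v' once a run is open: extend on x = prev+1, else flush [start, prev]
def pvGoB (v : List Int) (start prev : Int) : List (List Int) :=
  match v with
  | [] => [[start, prev]]
  | x :: rest =>
    if x = prev + 1 then pvGoB rest start x
    else [start, prev] :: pvGoB rest x x

def pvRangesB (v : List Int) : List (List Int) :=
  match v with
  | [] => []
  | x :: rest => pvGoB rest x x

def get_new_data_alt (apartment_data : List (String × List Int)) : List (String × List (List Int)) :=
  (apartment_data.foldl
    (fun (result : PySem.Dict String (List (List Int))) kv =>
      result.insert kv.1 (pvRangesB kv.2))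
    PySem.Dict.empty).items

-- ===== PRECONDITION & SPEC =====
def Spec_get_new_data (apartment_data : List (String × List Int)) (out : List (String × List (List Int))) : Prop := out = get_new_data_alt apartment_data
instance (apartment_data : List (String × List Int)) (out : List (String × List (List Int))) : Decidable (Spec_get_new_data apartment_data out) := by unfold Spec_get_new_data; infer_instance

-- ===== CLAIM (what is proved, stated in full; the proofs are below) =====
def Claim_equal_get_new_data : Prop := ∀ (apartment_data : List (String × List Int)), Dom_get_new_data apartment_data → Spec_get_new_data apartment_data (get_new_data apartment_data)

-- ===== LEMMAS AND PROOFS =====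

theorem pvGoB_eq (v : List Int) (i j : Nat) (hj : 1 ≤ j) (hij : i + j ≤ v.length) :
    pvGoB (v.drop (i + j)) (v.getD i 0) (v.getD i 0 + (j : Int) - 1) =
      [v.getD i 0, v.getD i 0 + (pvRunJ v i j : Int) - 1] :: pvOuterA v (i + pvRunJ v i j) := by
  rcases Nat.lt_or_ge (i + j) v.length with hlt | hge
  · rw [List.drop_eq_getElem_cons hlt]
    by_cases hc : v.getD i 0 + (j : Int) = v.getD (i + j) 0
    · have hx : v[i + j] = v.getD i 0 + (j : Int) - 1 + 1 := by
        rw [← List.getD_eq_getElem v 0 hlt]; omega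
      rw [pvGoB, if_pos hx]
      have hrw : pvRunJ v i j = pvRunJ v i (j + 1) := by
        rw [pvRunJ]; rw [if_pos ⟨hlt, hc⟩]
      have := pvGoB_eq v i (j + 1) (by omega) (by omega)
      rw [hrw]
      push_cast at this
      have harg : v.getD i 0 + ((j : Int) + 1) - 1 = v[i + j] := by omega
      rw [harg] at this
      have harg2 : i + (j + 1) = i + j + 1 := by omega
      rw [harg2] at this
      exact this
    · have hx : ¬ (v[i + j] = v.getD i 0 + (j : Int) - 1 + 1) := by
        rw [← List.getD_eq_getElem v 0 hlt]; omega
      rw [pvGoB, if_neg hx]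
      have hrw : pvRunJ v i j = j := by
        rw [pvRunJ]; rw [if_neg (by tauto)]
      rw [hrw]
      have houter : pvOuterA v (i + j) =
          [v.getD (i + j) 0, v.getD (i + j) 0 + (pvRunJ v (i + j) 1 : Int) - 1]
            :: pvOuterA v (i + j + pvRunJ v (i + j) 1) := by
        rw [pvOuterA, dif_pos hlt]
      rw [houter]
      have := pvGoB_eq v (i + j) 1 (le_refl 1) (by omega)
      have harg : v.getD (i + j) 0 + ((1 : Nat) : Int) - 1 = v.getD (i + j) 0 := by
        norm_num
      rw [harg] at this
      rw [List.getD_eq_getElem v 0 hlt] at this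
      rw [List.getD_eq_getElem v 0 hlt]
      rw [← this]
  · have heq : i + j = v.length := by omega
    have hdrop : v.drop (i + j) = [] := by
      apply List.drop_eq_nil_of_le; omega
    have hrw : pvRunJ v i j = j := by
      rw [pvRunJ]; rw [if_neg (by omega)]
    have houter : pvOuterA v (i + j) = [] := by
      rw [pvOuterA]; rw [dif_neg (by omega)]
    rw [hdrop, hrw, houter, pvGoB]
termination_by v.length - (i + j)
decreasing_by all_goals omega

theorem pvRanges_eq (v : List Int) : pvRangesB v = pvOuterA v 0 := by
  match v with
  | [] => rw [pvRangesB, pvOuterA]; rw [dif_neg (by simp)]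
  | x :: rest =>
    rw [pvRangesB]
    have hlen : 0 + 1 ≤ (x :: rest).length := by simp
    have := pvGoB_eq (x :: rest) 0 1 (le_refl 1) hlen
    have h0 : (x :: rest).getD 0 0 = x := rfl
    have harg : (x : Int) + ((1 : Nat) : Int) - 1 = x := by norm_num
    rw [h0] at this
    rw [harg] at this
    have hdrop : (x :: rest).drop (0 + 1) = rest := rfl
    rw [hdrop] at this
    rw [this]
    conv_rhs => rw [pvOuterA]
    rw [dif_pos (show 0 < (x :: rest).length by simp)]
    simp only [List.getD_cons_zero, Nat.zero_add]

theorem get_new_data_spec : Claim_equal_get_new_data := by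
  intro ad _
  unfold Spec_get_new_data get_new_data get_new_data_alt
  have hf : (fun (result : PySem.Dict String (List (List Int))) (kv : String × List Int) =>
      result.insert kv.1 (pvOuterA kv.2 0)) =
      (fun (result : PySem.Dict String (List (List Int))) (kv : String × List Int) =>
      result.insert kv.1 (pvRangesB kv.2)) := by
    funext r kv; rw [pvRanges_eq]
  rw [hf]
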